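-- pv_equiv track=rewrite | github.com/bys96/algorithm | 프로그래머스/1/340198. ［PCCE 기출문제］ 10번 ／ 공원/［PCCE 기출문제］ 10번 ／ 공원.py | solution
-- ===== SOURCE A (Python) =====
-- def solution(mats, park):
--     answer = -1
--     col = len(park)
--     row = len(park[0])
--     dp = [];
--
--     for i in range(col):
--         arr = []
--         for j in range(row):
--             arr.append(0)
--         dp.append(arr)
--
--     for i in range(col):
--         for j in range(row):
--             if park[i][j] == "-1":
--                 if i == 0 or j == 0:
--                     dp[i][j] = 1
--                 else:
--                     dp[i][j] = min(
--                         dp[i-1][j],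
--                         dp[i][j-1],
--                         dp[i-1][j-1]
--                     ) + 1
--             else:
--                 dp[i][j] = 0
--
--     max_size = 0
--     for i in range(col):
--         for j in range(row):
--             if dp[i][j] > max_size:
--                 max_size = dp[i][j]
--
--     mats.sort(reverse=True)
--
--     for k in mats:
--         if k <= max_size:
--             answer = k
--             break
--
--     return answer
-- ===== SOURCE B (Python) =====
-- def solution(mats, park):
--     col, row = len(park), len(park[0])
--     best = 0
--     for k in range(min(col, row), 0, -1):
--         found = any(
--             all(park[i + di][j + dj] == "-1" for di in range(k) for dj in range(k))
--             for i in range(col - k + 1) for j in range(row - k + 1)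
--         )
--         if found:
--             best = k
--             break
--     mats.sort(reverse=True)
--     for k in mats:
--         if k <= best:
--             return k
--     return -1
-- ===== Notes on version B (the rewrite author's own statement) =====
-- stated objective: alternative
-- what changed: B drops A's maximal-square dynamic-programming table entirely: it searches candidate sizes from min(rows,cols) downward and tests each k x k window directly (with short-circuiting any/all) to find the largest all-empty square, then picks the first fitting mat as A does.
import Mathlib
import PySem

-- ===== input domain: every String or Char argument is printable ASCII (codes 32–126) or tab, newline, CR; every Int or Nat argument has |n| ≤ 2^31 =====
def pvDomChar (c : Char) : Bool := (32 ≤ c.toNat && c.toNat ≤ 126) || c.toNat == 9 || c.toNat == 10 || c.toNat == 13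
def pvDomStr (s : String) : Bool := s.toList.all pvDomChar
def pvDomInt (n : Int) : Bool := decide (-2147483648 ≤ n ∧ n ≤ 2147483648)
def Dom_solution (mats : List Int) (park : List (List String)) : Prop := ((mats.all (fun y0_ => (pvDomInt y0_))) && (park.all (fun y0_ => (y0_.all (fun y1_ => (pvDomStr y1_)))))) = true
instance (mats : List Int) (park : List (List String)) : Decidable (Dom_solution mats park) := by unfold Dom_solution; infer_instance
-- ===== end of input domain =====

-- B is a different algorithm (direct window search, largest size first) with the same result;
-- both Pythons sort `mats` in place with mats.sort(reverse=True), so the side effect on `mats`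
-- is identical and the theorems below are about the return value.

-- ===== PORT A =====
-- park[i][j] == "-1" (indices in range under Pre_solution)
def aCell (park : List (List String)) (i j : Nat) : Bool := ((park.getD i []).getD j "") == "-1"

-- the dp table is kept as a function Nat → Nat → Int (Python's list-of-lists of dp values),
-- updated cell by cell in the same row-major order as A's nested loops
def dpStep (park : List (List String)) (i : Nat) (dp : Nat → Nat → Int) (j : Nat) : Nat → Nat → Int :=
  let v : Int :=
    if aCell park i j then
      if i == 0 || j == 0 then 1
      else min (min (dp (i-1) j) (dp i (j-1))) (dp (i-1) (j-1)) + 1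
    else 0
  fun a b => if a == i && b == j then v else dp a b

def dpRow (park : List (List String)) (row : Nat) (dp : Nat → Nat → Int) (i : Nat) : Nat → Nat → Int :=
  (List.range row).foldl (dpStep park i) dp

def dpFill (park : List (List String)) (col row : Nat) : Nat → Nat → Int :=
  (List.range col).foldl (dpRow park row) (fun _ _ => 0)

def maxRow (dp : Nat → Nat → Int) (row : Nat) (m : Int) (i : Nat) : Int :=
  (List.range row).foldl (fun m j => if dp i j > m then dp i j else m) m

def maxAll (dp : Nat → Nat → Int) (col row : Nat) : Int :=
  (List.range col).foldl (maxRow dp row) 0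

-- the final loop: first k in the (descending) list with k ≤ max_size, else -1
def pickA (l : List Int) (m : Int) : Int :=
  match l with
  | [] => -1
  | k :: ks => if k ≤ m then k else pickA ks m

def solution (mats : List Int) (park : List (List String)) : Int :=
  let col := park.length
  let row := (park.headD []).length
  let dp := dpFill park col row
  let max_size := maxAll dp col row
  pickA (PySem.List.sorted mats (fun x => x) true) max_size

-- ===== PORT B =====
def bCell (park : List (List String)) (i j : Nat) : Bool := ((park.getD i []).getD j "") == "-1"

-- short-circuiting `any(f(i) for i in range(i0, i0+m))`
def exLt (f : Nat → Bool) : Nat → Nat → Bool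
  | 0, _ => false
  | m+1, i => if f i then true else exLt f m (i+1)

-- short-circuiting `all(f(i) for i in range(i0, i0+m))`
def alLt (f : Nat → Bool) : Nat → Nat → Bool
  | 0, _ => true
  | m+1, i => if f i then alLt f m (i+1) else false

-- any k×k window of "-1" cells?  (k ≤ col, k ≤ row when called)
def anyWindow (park : List (List String)) (col row k : Nat) : Bool :=
  exLt (fun i =>
    exLt (fun j =>
      alLt (fun di => alLt (fun dj => bCell park (i+di) (j+dj)) k 0) k 0)
      (row - k + 1) 0)
    (col - k + 1) 0

-- for k in range(kmax, 0, -1): first k with an all-empty window, else 0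
def findBest (park : List (List String)) (col row : Nat) : Nat → Int
  | 0 => 0
  | k+1 => if anyWindow park col row (k+1) then ((k : Int) + 1) else findBest park col row k

def pickB (l : List Int) (m : Int) : Int :=
  match l with
  | [] => -1
  | k :: ks => if k ≤ m then k else pickB ks m

def solution_alt (mats : List Int) (park : List (List String)) : Int :=
  let col := park.length
  let row := (park.headD []).length
  let best := findBest park col row (min col row)
  pickB (PySem.List.sorted mats (fun x => x) true) best

-- ===== PRECONDITION & SPEC =====
-- exactly the inputs on which Python A returns: park nonempty and every row at least as long
-- as the first (A indexes park[i][j] for all j < len(park[0]) and raises IndexError otherwise)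
def Pre_solution (mats : List Int) (park : List (List String)) : Prop :=
  park ≠ [] ∧ ∀ r ∈ park, (park.headD []).length ≤ r.length
instance (mats : List Int) (park : List (List String)) : Decidable (Pre_solution mats park) := by
  unfold Pre_solution; infer_instance

def pvWitness_solution : List Int × List (List String) :=
  ([5, 2, 1], [["-1", "-1", "X"], ["-1", "-1", "-1"]])

def Spec_solution (mats : List Int) (park : List (List String)) (out : Int) : Prop := out = solution_alt mats park
instance (mats : List Int) (park : List (List String)) (out : Int) : Decidable (Spec_solution mats park out) := by unfold Spec_solution; infer_instance

-- ===== CLAIM (what is proved, stated in full; the proofs are below) =====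
def Claim_equal_solution : Prop := ∀ (mats : List Int) (park : List (List String)), Dom_solution mats park → Pre_solution mats park → Spec_solution mats park (solution mats park)

-- ===== LEMMAS AND PROOFS =====

-- the pure value of A's dp recurrence
def fpark (park : List (List String)) : Nat → Nat → Int
  | 0, j => if aCell park 0 j then 1 else 0
  | i+1, 0 => if aCell park (i+1) 0 then 1 else 0
  | i+1, j+1 =>
      if aCell park (i+1) (j+1) then
        min (min (fpark park i (j+1)) (fpark park (i+1) j)) (fpark park i j) + 1
      else 0
termination_by i j => (i, j)

theorem bCell_eq (park : List (List String)) (i j : Nat) : bCell park i j = aCell park i j := rfl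

theorem fpark_nonneg_aux (park : List (List String)) :
    ∀ n : Nat, ∀ i j, i + j = n → 0 ≤ fpark park i j := by
  intro n
  induction n using Nat.strong_induction_on with
  | _ n ih =>
  intro i j hn
  rcases i with _ | i
  · simp only [fpark]; split <;> omega
  · rcases j with _ | j
    · simp only [fpark]; split <;> omega
    · have h1 : 0 ≤ fpark park i (j+1) := ih (i+(j+1)) (by omega) i (j+1) rfl
      have h2 : 0 ≤ fpark park (i+1) j := ih ((i+1)+j) (by omega) (i+1) j rfl
      have h3 : 0 ≤ fpark park i j := ih (i+j) (by omega) i j rfl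
      simp only [fpark]
      split
      · have h := le_min (le_min h1 h2) h3
        omega
      · omega

theorem fpark_nonneg (park : List (List String)) (i j : Nat) : 0 ≤ fpark park i j :=
  fpark_nonneg_aux park (i+j) i j rfl

theorem fpark_def (park : List (List String)) (i j : Nat) :
    fpark park i j =
      if aCell park i j then
        if i = 0 ∨ j = 0 then 1
        else min (min (fpark park (i-1) j) (fpark park i (j-1))) (fpark park (i-1) (j-1)) + 1
      else 0 := by
  rcases i with _ | i <;> rcases j with _ | j <;> simp [fpark]

theorem dpRow_inv (park : List (List String)) (row i : Nat) (dp : Nat → Nat → Int)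
    (hdp : ∀ a b, dp a b = if b < row ∧ a < i then fpark park a b else 0) :
    ∀ j, j ≤ row → ∀ a b,
      ((List.range j).foldl (dpStep park i) dp) a b
        = if b < row ∧ (a < i ∨ (a = i ∧ b < j)) then fpark park a b else 0 := by
  intro j
  induction j with
  | zero =>
    intro _ a b
    rw [List.range_zero, List.foldl_nil, hdp a b]
    exact if_congr (by omega) rfl rfl
  | succ j ihj =>
    intro hj a b
    have hchar := ihj (by omega)
    rw [List.range_succ, List.foldl_append, List.foldl_cons, List.foldl_nil]
    set dp' := (List.range j).foldl (dpStep park i) dp with hdef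
    have hv : (if aCell park i j then
        if i == 0 || j == 0 then (1:Int)
        else min (min (dp' (i-1) j) (dp' i (j-1))) (dp' (i-1) (j-1)) + 1
      else 0) = fpark park i j := by
      rw [fpark_def park i j]
      by_cases hc : aCell park i j = true
      · rw [if_pos hc, if_pos hc]
        by_cases h0 : i = 0 ∨ j = 0
        · rw [if_pos (by simpa using h0), if_pos h0]
        · rw [if_neg (by simpa using h0), if_neg h0]
          rw [hchar (i-1) j, hchar i (j-1), hchar (i-1) (j-1)]
          rw [if_pos ⟨by omega, by omega⟩, if_pos ⟨by omega, by omega⟩,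
              if_pos ⟨by omega, by omega⟩]
      · rw [if_neg hc, if_neg hc]
    by_cases hab : a = i ∧ b = j
    · obtain ⟨h1, h2⟩ := hab
      rw [h1, h2]
      simp only [dpStep]
      rw [if_pos (by simp)]
      rw [hv]
      rw [if_pos (show j < row ∧ (i < i ∨ True ∧ j < j + 1) from ⟨by omega, Or.inr ⟨trivial, by omega⟩⟩)]
    · simp only [dpStep]
      rw [if_neg (by simp only [Bool.and_eq_true, beq_iff_eq]; exact hab)]
      rw [hchar a b]
      exact if_congr (by omega) rfl rfl

theorem dpFill_inv (park : List (List String)) (col row : Nat) :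
    ∀ i, i ≤ col → ∀ a b,
      ((List.range i).foldl (dpRow park row) (fun _ _ => 0)) a b
        = if b < row ∧ a < i then fpark park a b else 0 := by
  intro i
  induction i with
  | zero => intro _ a b; simp
  | succ i ihi =>
    intro hi a b
    rw [List.range_succ, List.foldl_append, List.foldl_cons, List.foldl_nil]
    have h := dpRow_inv park row i ((List.range i).foldl (dpRow park row) (fun _ _ => 0))
      (ihi (by omega)) row le_rfl a b
    simp only [dpRow]
    rw [h]
    exact if_congr (by omega) rfl rfl

theorem dpFill_eq (park : List (List String)) (col row a b : Nat) :
    dpFill park col row a b = if b < row ∧ a < col then fpark park a b else 0 := by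
  simp only [dpFill]
  exact dpFill_inv park col row col le_rfl a b

-- generic characterisation of A's running-max fold
theorem foldl_maxg (g : Nat → Int) (l : List Nat) (m0 : Int) :
    m0 ≤ l.foldl (fun m x => if g x > m then g x else m) m0
    ∧ (∀ x ∈ l, g x ≤ l.foldl (fun m x => if g x > m then g x else m) m0)
    ∧ (l.foldl (fun m x => if g x > m then g x else m) m0 = m0
        ∨ ∃ x ∈ l, l.foldl (fun m x => if g x > m then g x else m) m0 = g x) := by
  induction l generalizing m0 with
  | nil => exact ⟨le_rfl, by simp, Or.inl rfl⟩
  | cons x xs ih =>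
    simp only [List.foldl_cons]
    obtain ⟨h1, h2, h3⟩ := ih (if g x > m0 then g x else m0)
    have hm0 : m0 ≤ (if g x > m0 then g x else m0) := by split <;> omega
    have hx : g x ≤ (if g x > m0 then g x else m0) := by split <;> omega
    refine ⟨le_trans hm0 h1, ?_, ?_⟩
    · intro y hy
      rcases List.mem_cons.mp hy with rfl | hy'
      · exact le_trans hx h1
      · exact h2 y hy'
    · rcases h3 with he | ⟨y, hy, he⟩
      · by_cases hgt : g x > m0
        · right
          refine ⟨x, by simp, ?_⟩
          rw [he, if_pos hgt]
        · left
          rw [he, if_neg hgt]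
      · right
        exact ⟨y, by simp [hy], he⟩

theorem maxAll_spec (dp : Nat → Nat → Int) (col row : Nat) :
    0 ≤ maxAll dp col row
    ∧ (∀ a b, a < col → b < row → dp a b ≤ maxAll dp col row)
    ∧ (maxAll dp col row = 0 ∨ ∃ a b, a < col ∧ b < row ∧ maxAll dp col row = dp a b) := by
  induction col with
  | zero =>
    refine ⟨by simp [maxAll], ?_, Or.inl (by simp [maxAll])⟩
    intro a b ha _
    exact absurd ha (Nat.not_lt_zero a)
  | succ col ih =>
    obtain ⟨h0, hub, hcase⟩ := ih
    have hstep : maxAll dp (col+1) row = maxRow dp row (maxAll dp col row) col := by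
      simp [maxAll, List.range_succ]
    have hR : maxRow dp row (maxAll dp col row) col
        = (List.range row).foldl (fun m x => if dp col x > m then dp col x else m)
            (maxAll dp col row) := rfl
    obtain ⟨g1, g2, g3⟩ := foldl_maxg (dp col) (List.range row) (maxAll dp col row)
    refine ⟨?_, ?_, ?_⟩
    · rw [hstep, hR]; exact le_trans h0 g1
    · intro a b ha hb
      rw [hstep, hR]
      rcases Nat.lt_or_ge a col with h | h
      · exact le_trans (hub a b h hb) g1
      · have haeq : a = col := by omega
        subst haeq
        exact g2 b (List.mem_range.mpr hb)
    · rw [hstep, hR]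
      rcases g3 with he | ⟨x, hx, he⟩
      · rw [he]
        rcases hcase with h | ⟨a, b, ha, hb, h⟩
        · left; exact h
        · right; exact ⟨a, b, by omega, hb, h⟩
      · right
        exact ⟨col, x, by omega, List.mem_range.mp hx, he⟩

-- the key dp characterisation: fpark ≥ k iff a k×k all-"-1" square ends at (i,j)
theorem fpark_ge_iff_aux (park : List (List String)) :
    ∀ n : Nat, ∀ i j, i + j = n → ∀ k : Nat, 1 ≤ k →
      (((k : Int) ≤ fpark park i j)
        ↔ (k ≤ i+1 ∧ k ≤ j+1 ∧ ∀ di < k, ∀ dj < k, aCell park (i-di) (j-dj) = true)) := by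
  intro n
  induction n using Nat.strong_induction_on with
  | _ n ih =>
  intro i j hn k hk
  rcases i with _ | i
  · constructor
    · intro h
      by_cases hc : aCell park 0 j = true
      · simp only [fpark] at h
        rw [if_pos hc] at h
        have hk1 : k = 1 := by omega
        subst hk1
        refine ⟨by omega, by omega, ?_⟩
        intro di hdi dj hdj
        have e1 : di = 0 := by omega
        have e2 : dj = 0 := by omega
        subst e1; subst e2
        simpa using hc
      · simp only [fpark] at h
        rw [if_neg hc] at h
        exfalso; omega
    · rintro ⟨h1, h2, hsq⟩
      have hk1 : k = 1 := by omega
      subst hk1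
      have hc := hsq 0 (by omega) 0 (by omega)
      simp only [Nat.sub_zero] at hc
      simp only [fpark]
      rw [if_pos hc]
      omega
  · rcases j with _ | j
    · constructor
      · intro h
        by_cases hc : aCell park (i+1) 0 = true
        · simp only [fpark] at h
          rw [if_pos hc] at h
          have hk1 : k = 1 := by omega
          subst hk1
          refine ⟨by omega, by omega, ?_⟩
          intro di hdi dj hdj
          have e1 : di = 0 := by omega
          have e2 : dj = 0 := by omega
          subst e1; subst e2
          simpa using hc
        · simp only [fpark] at h
          rw [if_neg hc] at h
          exfalso; omega
      · rintro ⟨h1, h2, hsq⟩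
        have hk1 : k = 1 := by omega
        subst hk1
        have hc := hsq 0 (by omega) 0 (by omega)
        simp only [Nat.sub_zero] at hc
        simp only [fpark]
        rw [if_pos hc]
        omega
    · have ih1 := fun k' hk' => ih (i+(j+1)) (by omega) i (j+1) rfl k' hk'
      have ih2 := fun k' hk' => ih ((i+1)+j) (by omega) (i+1) j rfl k' hk'
      have ih3 := fun k' hk' => ih (i+j) (by omega) i j rfl k' hk'
      by_cases hc : aCell park (i+1) (j+1) = true
      · simp only [fpark]
        rw [if_pos hc]
        rcases Nat.lt_or_ge k 2 with hk2 | hk2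
        · have hk1 : k = 1 := by omega
          subst hk1
          constructor
          · intro _
            refine ⟨by omega, by omega, ?_⟩
            intro di hdi dj hdj
            have e1 : di = 0 := by omega
            have e2 : dj = 0 := by omega
            subst e1; subst e2
            simpa using hc
          · intro _
            have h0 : (0:Int) ≤ min (min (fpark park i (j+1)) (fpark park (i+1) j)) (fpark park i j) :=
              le_min (le_min (fpark_nonneg park i (j+1)) (fpark_nonneg park (i+1) j)) (fpark_nonneg park i j)
            omega
        · obtain ⟨k', rfl⟩ : ∃ k', k = k' + 1 := ⟨k - 1, by omega⟩
          have hk' : 1 ≤ k' := by omega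
          have key : (((k' + 1 : Nat) : Int)
                ≤ min (min (fpark park i (j+1)) (fpark park (i+1) j)) (fpark park i j) + 1)
              ↔ (((k' : Nat) : Int) ≤ fpark park i (j+1)
                  ∧ ((k' : Nat) : Int) ≤ fpark park (i+1) j
                  ∧ ((k' : Nat) : Int) ≤ fpark park i j) := by
            constructor
            · intro h
              have h' : ((k' : Nat) : Int)
                  ≤ min (min (fpark park i (j+1)) (fpark park (i+1) j)) (fpark park i j) := by
                push_cast at h ⊢; omega
              rw [le_min_iff, le_min_iff] at h'
              exact ⟨h'.1.1, h'.1.2, h'.2⟩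
            · rintro ⟨hA, hB, hC⟩
              have h' := le_min (le_min hA hB) hC
              push_cast
              omega
          rw [key, ih1 k' hk', ih2 k' hk', ih3 k' hk']
          constructor
          · rintro ⟨⟨ha1, hb1, s1⟩, ⟨ha2, hb2, s2⟩, ⟨ha3, hb3, s3⟩⟩
            refine ⟨by omega, by omega, ?_⟩
            intro di hdi dj hdj
            rcases Nat.eq_zero_or_pos di with rfl | hdi0
            · rcases Nat.eq_zero_or_pos dj with rfl | hdj0
              · simpa using hc
              · have h := s2 0 (by omega) (dj-1) (by omega)
                rw [show j + 1 - dj = j - (dj - 1) from by omega]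
                simpa using h
            · rcases Nat.eq_zero_or_pos dj with rfl | hdj0
              · have h := s1 (di-1) (by omega) 0 (by omega)
                rw [show i + 1 - di = i - (di - 1) from by omega]
                simpa using h
              · have h := s3 (di-1) (by omega) (dj-1) (by omega)
                rw [show i + 1 - di = i - (di - 1) from by omega,
                    show j + 1 - dj = j - (dj - 1) from by omega]
                exact h
          · rintro ⟨ha, hb, s⟩
            refine ⟨⟨by omega, by omega, ?_⟩, ⟨by omega, by omega, ?_⟩, ⟨by omega, by omega, ?_⟩⟩
            · intro di hdi dj hdj
              have h := s (di+1) (by omega) dj (by omega)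
              rw [show i - di = i + 1 - (di+1) from by omega]
              exact h
            · intro di hdi dj hdj
              have h := s di (by omega) (dj+1) (by omega)
              rw [show j - dj = j + 1 - (dj+1) from by omega]
              exact h
            · intro di hdi dj hdj
              have h := s (di+1) (by omega) (dj+1) (by omega)
              rw [show i - di = i + 1 - (di+1) from by omega,
                  show j - dj = j + 1 - (dj+1) from by omega]
              exact h
      · simp only [fpark]
        rw [if_neg hc]
        constructor
        · intro h; exfalso; omega
        · rintro ⟨_, _, hsq⟩
          exfalso
          have h := hsq 0 (by omega) 0 (by omega)
          simp only [Nat.sub_zero] at h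
          exact hc h

theorem fpark_ge_iff (park : List (List String)) (i j k : Nat) (hk : 1 ≤ k) :
    ((k : Int) ≤ fpark park i j)
      ↔ (k ≤ i+1 ∧ k ≤ j+1 ∧ ∀ di < k, ∀ dj < k, aCell park (i-di) (j-dj) = true) :=
  fpark_ge_iff_aux park (i+j) i j rfl k hk

theorem exLt_iff (f : Nat → Bool) (m i : Nat) :
    exLt f m i = true ↔ ∃ d < m, f (i+d) = true := by
  induction m generalizing i with
  | zero => simp [exLt]
  | succ m ih =>
    simp only [exLt]
    by_cases h : f i = true
    · rw [if_pos h]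
      constructor
      · intro _
        exact ⟨0, by omega, by simpa using h⟩
      · intro _; rfl
    · rw [if_neg h, ih (i+1)]
      constructor
      · rintro ⟨d, hd, hf⟩
        exact ⟨d+1, by omega, by rw [show i + (d+1) = i + 1 + d from by omega]; exact hf⟩
      · rintro ⟨d, hd, hf⟩
        rcases d with _ | d
        · simp only [Nat.add_zero] at hf
          exact absurd hf h
        · exact ⟨d, by omega, by rw [show i + 1 + d = i + (d+1) from by omega]; exact hf⟩

theorem alLt_iff (f : Nat → Bool) (m i : Nat) :
    alLt f m i = true ↔ ∀ d < m, f (i+d) = true := by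
  induction m generalizing i with
  | zero => simp [alLt]
  | succ m ih =>
    simp only [alLt]
    by_cases h : f i = true
    · rw [if_pos h, ih (i+1)]
      constructor
      · intro hall d hd
        rcases d with _ | d
        · simpa using h
        · rw [show i + (d+1) = i + 1 + d from by omega]
          exact hall d (by omega)
      · intro hall d hd
        rw [show i + 1 + d = i + (d+1) from by omega]
        exact hall (d+1) (by omega)
    · rw [if_neg h]
      constructor
      · intro hfalse; simp at hfalse
      · intro hall
        exfalso
        exact h (by simpa using hall 0 (by omega))

theorem anyWindow_iff (park : List (List String)) (col row k : Nat)
    (hk : 1 ≤ k) (hc : k ≤ col) (hr : k ≤ row) :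
    anyWindow park col row k = true
      ↔ ∃ a b, a < col ∧ b < row ∧ (k : Int) ≤ fpark park a b := by
  constructor
  · intro h
    simp only [anyWindow, exLt_iff, alLt_iff, Nat.zero_add, bCell_eq] at h
    obtain ⟨i, hi, j, hj, hw⟩ := h
    refine ⟨i + k - 1, j + k - 1, by omega, by omega, ?_⟩
    rw [fpark_ge_iff park _ _ k hk]
    refine ⟨by omega, by omega, ?_⟩
    intro di hdi dj hdj
    have h2 := hw (k - 1 - di) (by omega) (k - 1 - dj) (by omega)
    rw [show i + k - 1 - di = i + (k - 1 - di) from by omega,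
        show j + k - 1 - dj = j + (k - 1 - dj) from by omega]
    exact h2
  · rintro ⟨a, b, ha, hb, hf⟩
    rw [fpark_ge_iff park a b k hk] at hf
    obtain ⟨ha1, hb1, hsq⟩ := hf
    simp only [anyWindow, exLt_iff, alLt_iff, Nat.zero_add, bCell_eq]
    refine ⟨a + 1 - k, by omega, b + 1 - k, by omega, ?_⟩
    intro di hdi dj hdj
    have h2 := hsq (k - 1 - di) (by omega) (k - 1 - dj) (by omega)
    rw [show a + 1 - k + di = a - (k - 1 - di) from by omega,
        show b + 1 - k + dj = b - (k - 1 - dj) from by omega]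
    exact h2

theorem findBest_eq (park : List (List String)) (col row : Nat) :
    findBest park col row (min col row) = maxAll (dpFill park col row) col row := by
  obtain ⟨hM0, hMub, hMcase⟩ := maxAll_spec (dpFill park col row) col row
  set M := maxAll (dpFill park col row) col row with hMdef
  have key : ∀ k : Nat, 1 ≤ k → k ≤ col → k ≤ row →
      (anyWindow park col row k = true ↔ (k:Int) ≤ M) := by
    intro k hk hkc hkr
    rw [anyWindow_iff park col row k hk hkc hkr]
    constructor
    · rintro ⟨a, b, ha, hb, hf⟩
      have hub := hMub a b ha hb
      rw [dpFill_eq, if_pos ⟨hb, ha⟩] at hub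
      omega
    · intro hM
      rcases hMcase with h | ⟨a, b, ha, hb, h⟩
      · rw [h] at hM; exfalso; omega
      · refine ⟨a, b, ha, hb, ?_⟩
        rw [dpFill_eq, if_pos ⟨hb, ha⟩] at h
        omega
  have hMbound : M ≤ ((min col row : Nat) : Int) := by
    rcases hMcase with h | ⟨a, b, ha, hb, h⟩
    · rw [h]; exact_mod_cast Nat.zero_le (min col row)
    · rw [dpFill_eq, if_pos ⟨hb, ha⟩] at h
      by_cases hpos : 1 ≤ M
      · have hk1 : 1 ≤ M.toNat := by omega
        have hcast : ((M.toNat : Nat) : Int) = M := Int.toNat_of_nonneg hM0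
        have hge : ((M.toNat : Nat) : Int) ≤ fpark park a b := by
          rw [hcast, h]
        obtain ⟨hka, hkb, _⟩ := (fpark_ge_iff park a b M.toNat hk1).mp hge
        have hmin : M.toNat ≤ min col row := by
          refine Nat.le_min.mpr ⟨by omega, by omega⟩
        omega
      · have : (0:Int) ≤ ((min col row : Nat) : Int) := by exact_mod_cast Nat.zero_le (min col row)
        omega
  have main : ∀ m : Nat, m ≤ min col row → M ≤ (m:Int) → findBest park col row m = M := by
    intro m
    induction m with
    | zero =>
      intro _ hm
      simp only [findBest]
      omega
    | succ m ih =>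
      intro hm hMm
      simp only [findBest]
      by_cases hw : anyWindow park col row (m+1) = true
      · rw [if_pos hw]
        have h2 := (key (m+1) (by omega) (by omega) (by omega)).mp hw
        push_cast at h2 hMm ⊢
        omega
      · rw [if_neg hw]
        have hle : M ≤ (m:Int) := by
          by_contra hgt
          push_neg at hgt
          exact hw ((key (m+1) (by omega) (by omega) (by omega)).mpr (by push_cast; omega))
        exact ih (by omega) hle
  exact main (min col row) le_rfl hMbound

theorem pick_eq (l : List Int) (m : Int) : pickA l m = pickB l m := by
  induction l with
  | nil => rfl
  | cons k ks ih =>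
    simp only [pickA, pickB]
    split
    · rfl
    · exact ih

-- ===== VERDICT (by name: the statement is the Claim_ definition above) =====
theorem solution_spec : Claim_equal_solution := by
  intro mats park _ _
  unfold Spec_solution solution solution_alt
  dsimp only
  rw [pick_eq, findBest_eq]
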